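-- pv_equiv track=rewrite | github.com/Limexcyan/mgreks | utils.py | is_partition
-- ===== SOURCE A (Python) =====
-- def is_partition(candidate_for_partition):
--     """
--     Returns True if *given_set* is a proper partition (by the definition)
--     :param given_set:
--     """
--     used_integers = []
--     for block in candidate_for_partition:
--         for element in block:
--             if element not in used_integers:
--                 used_integers.append(element)
--             else:
--                 return False
-- ===== SOURCE B (Python) =====
-- def is_partition(candidate_for_partition):
--     """
--     Returns True if *given_set* is a proper partition (by the definition)
--     :param given_set:
--     """
--     flat = [element for block in candidate_for_partition for element in block]
--     if len(flat) != len(set(flat)):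
--         return False
-- ===== Notes on version B (the rewrite author's own statement) =====
-- stated objective: simpler
-- what changed: Replaces the incremental nested loop with membership scans and early return by a single flatten followed by one set-cardinality comparison (len(flat) != len(set(flat))).
import Mathlib
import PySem

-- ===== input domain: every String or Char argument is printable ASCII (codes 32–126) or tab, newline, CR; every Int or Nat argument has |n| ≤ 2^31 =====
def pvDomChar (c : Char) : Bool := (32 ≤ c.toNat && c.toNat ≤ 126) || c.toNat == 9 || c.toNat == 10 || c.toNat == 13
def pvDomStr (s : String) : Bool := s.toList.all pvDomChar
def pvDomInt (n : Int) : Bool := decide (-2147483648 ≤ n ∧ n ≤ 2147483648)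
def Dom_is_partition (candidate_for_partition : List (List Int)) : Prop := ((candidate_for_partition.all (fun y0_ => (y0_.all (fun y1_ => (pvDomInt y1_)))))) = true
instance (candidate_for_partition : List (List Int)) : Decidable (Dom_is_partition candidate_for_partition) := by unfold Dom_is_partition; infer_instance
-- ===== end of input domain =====

-- B replaces A's nested loop with incremental membership scans by one flatten plus a
-- single set-cardinality comparison (simpler; same return values, including the implicit None).

-- ===== PORT A =====
-- inner 'for element in block' loop: none = the 'return False' branch fired
def pvInnerA (used : List Int) : List Int → Option (List Int)
  | [] => some used
  | e :: rest => if e ∉ used then pvInnerA (used ++ [e]) rest else none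

-- outer 'for block in candidate_for_partition' loop; fall-through returns None
def pvOuterA (used : List Int) : List (List Int) → Option Bool
  | [] => none
  | b :: bs =>
    match pvInnerA used b with
    | some used' => pvOuterA used' bs
    | none => some false

def is_partition (candidate_for_partition : List (List Int)) : Option Bool :=
  pvOuterA [] candidate_for_partition

-- ===== PORT B =====
def is_partition_alt (candidate_for_partition : List (List Int)) : Option Bool :=
  let flat := candidate_for_partition.flatMap (fun block => block)
  if PySem.List.len flat ≠ PySem.Set.len (PySem.Set.ofList flat) then some false else none

-- ===== PRECONDITION & SPEC =====
def Spec_is_partition (candidate_for_partition : List (List Int)) (out : Option Bool) : Prop := out = is_partition_alt candidate_for_partition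
instance (candidate_for_partition : List (List Int)) (out : Option Bool) : Decidable (Spec_is_partition candidate_for_partition out) := by unfold Spec_is_partition; infer_instance

-- ===== CLAIM (what is proved, stated in full; the proofs are below) =====
def Claim_equal_is_partition : Prop := ∀ (candidate_for_partition : List (List Int)), Dom_is_partition candidate_for_partition → Spec_is_partition candidate_for_partition (is_partition candidate_for_partition)

-- ===== LEMMAS AND PROOFS =====

theorem pvInnerA_eq (b : List Int) : ∀ (used : List Int), used.Nodup →
    pvInnerA used b = if (used ++ b).Nodup then some (used ++ b) else none := by
  induction b with
  | nil => intro used h; simp [pvInnerA, h]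
  | cons e rest ih =>
    intro used h
    by_cases he : e ∈ used
    · have hno : ¬ (used ++ e :: rest).Nodup := by
        intro hn
        rw [List.nodup_middle] at hn
        rcases List.nodup_cons.mp hn with ⟨hne, -⟩
        exact hne (List.mem_append_left _ he)
      simp [pvInnerA, he, hno]
    · have h' : (used ++ [e]).Nodup := by
        rw [show used ++ [e] = used ++ e :: [] from rfl, List.nodup_middle]
        simp [List.nodup_cons, he, h]
      rw [pvInnerA]
      simp only [he, not_false_eq_true, if_true]
      rw [ih _ h']
      simp [List.append_assoc]

theorem pvOuterA_eq (bs : List (List Int)) : ∀ (used : List Int), used.Nodup →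
    pvOuterA used bs = if (used ++ bs.flatten).Nodup then none else some false := by
  induction bs with
  | nil => intro used h; simp [pvOuterA, h]
  | cons b rest ih =>
    intro used h
    rw [pvOuterA, pvInnerA_eq _ _ h]
    by_cases hb : (used ++ b).Nodup
    · simp only [hb, if_true]
      rw [ih _ hb]
      simp [List.append_assoc]
    · have hno : ¬ ((used ++ b) ++ rest.flatten).Nodup :=
        fun hn => hb (hn.sublist (List.sublist_append_left _ _))
      rw [List.append_assoc] at hno
      simp [hb, List.flatten_cons, hno]

theorem len_foldl_add_le (l : List Int) : ∀ (s : List Int),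
    (l.foldl PySem.Set.add s).length ≤ s.length + l.length := by
  induction l with
  | nil => intro s; simp
  | cons x xs ih =>
    intro s
    rw [List.foldl_cons]
    by_cases hx : x ∈ s
    · have hadd : PySem.Set.add s x = s := by simp [PySem.Set.add, hx]
      rw [hadd]
      have h2 := ih s
      simp only [List.length_cons]
      omega
    · have hadd : PySem.Set.add s x = s ++ [x] := by simp [PySem.Set.add, hx]
      rw [hadd]
      have h2 := ih (s ++ [x])
      simp only [List.length_append, List.length_cons, List.length_nil] at h2 ⊢
      omega

theorem len_foldl_add_eq_iff (l : List Int) : ∀ (s : List Int), s.Nodup →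
    ((l.foldl PySem.Set.add s).length = s.length + l.length ↔ (s ++ l).Nodup) := by
  induction l with
  | nil => intro s h; simpa using h
  | cons x xs ih =>
    intro s h
    rw [List.foldl_cons]
    by_cases hx : x ∈ s
    · have hadd : PySem.Set.add s x = s := by simp [PySem.Set.add, hx]
      rw [hadd]
      have hno : ¬ (s ++ x :: xs).Nodup := by
        intro hn
        rw [List.nodup_middle] at hn
        rcases List.nodup_cons.mp hn with ⟨hne, -⟩
        exact hne (List.mem_append_left _ hx)
      simp only [hno, iff_false]
      have hle := len_foldl_add_le xs s
      simp only [List.length_cons]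
      omega
    · have hadd : PySem.Set.add s x = s ++ [x] := by simp [PySem.Set.add, hx]
      have h' : (s ++ [x]).Nodup := by
        rw [show s ++ [x] = s ++ x :: [] from rfl, List.nodup_middle]
        simp [List.nodup_cons, hx, h]
      rw [hadd]
      rw [show s.length + (x :: xs).length = (s ++ [x]).length + xs.length by
        simp; omega]
      rw [show s ++ x :: xs = (s ++ [x]) ++ xs by simp]
      exact ih _ h'

theorem ofList_len_eq_iff (l : List Int) :
    ((PySem.Set.ofList l).length = l.length ↔ l.Nodup) := by
  have := len_foldl_add_eq_iff l [] (by simp)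
  simpa [PySem.Set.ofList_eq_foldl] using this

-- ===== VERDICT (by name: the statement is the Claim_ definition above) =====
theorem is_partition_spec : Claim_equal_is_partition := by
  intro c _
  unfold Spec_is_partition is_partition is_partition_alt
  rw [pvOuterA_eq c [] (by simp)]
  have hflat : c.flatMap (fun block => block) = c.flatten := by simp
  simp only [hflat, List.nil_append]
  by_cases hn : c.flatten.Nodup
  · have hlen := (ofList_len_eq_iff c.flatten).mpr hn
    simp [hn, PySem.List.len, PySem.Set.len, hlen]
  · have hlen : (PySem.Set.ofList c.flatten).length ≠ c.flatten.length :=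
      fun hh => hn ((ofList_len_eq_iff _).mp hh)
    have hle : (PySem.Set.ofList c.flatten).length ≤ c.flatten.length := by
      simpa [PySem.Set.ofList_eq_foldl] using len_foldl_add_le c.flatten []
    simp only [hn, if_false]
    have hc : PySem.List.len c.flatten ≠ PySem.Set.len (PySem.Set.ofList c.flatten) := by
      simp only [PySem.Set.len, PySem.List.len]
      intro hh
      exact hlen (by exact_mod_cast hh.symm)
    rw [if_pos hc]
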